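-- pv_equiv track=rewrite | github.com/tradeactives-droid/batteryengine-server | tests/test_profile_generator_monthly.py | _month_sums_from_hourly
-- ===== SOURCE A (Python) =====
-- def _month_sums_from_hourly(values):
--     days_per_month = [31, 28, 31, 30, 31, 30, 31, 31, 30, 31, 30, 31]
--     out = []
--     idx = 0
--     for days in days_per_month:
--         steps = days * 24
--         out.append(sum(values[idx: idx + steps]))
--         idx += steps
--     return out
-- ===== SOURCE B (Python) =====
-- def _month_sums_from_hourly(values):
--     # prefix-sum table, then difference at the 12 cumulative month boundaries
--     n = len(values)
--     prefix = [0]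
--     acc = 0
--     for v in values:
--         acc += v
--         prefix.append(acc)
--     bounds = [0, 744, 1416, 2160, 2880, 3624, 4344, 5088, 5832, 6552, 7296, 8016, 8760]
--     return [prefix[min(bounds[i + 1], n)] - prefix[min(bounds[i], n)] for i in range(12)]
-- ===== Notes on version B (the rewrite author's own statement) =====
-- stated objective: alternative
-- what changed: Replaces per-month slice summation with a single prefix-sum pass plus differencing at precomputed cumulative month boundaries clamped to len(values).
import Mathlib
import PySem

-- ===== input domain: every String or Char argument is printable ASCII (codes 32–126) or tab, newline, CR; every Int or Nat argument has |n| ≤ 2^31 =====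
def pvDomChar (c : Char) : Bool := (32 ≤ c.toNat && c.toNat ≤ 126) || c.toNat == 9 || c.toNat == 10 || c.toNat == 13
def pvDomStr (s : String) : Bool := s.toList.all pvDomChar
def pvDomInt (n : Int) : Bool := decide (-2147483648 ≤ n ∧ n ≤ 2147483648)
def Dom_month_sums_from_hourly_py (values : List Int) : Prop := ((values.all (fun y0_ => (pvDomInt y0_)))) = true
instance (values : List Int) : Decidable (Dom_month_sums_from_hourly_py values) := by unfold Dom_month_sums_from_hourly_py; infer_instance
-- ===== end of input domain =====

-- B replaces per-month slice summation by one pfx-sum pass plus differencing at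
-- clamped cumulative month boundaries (alternative decomposition, same O(n) cost).


-- ===== PORT A =====
def month_sums_from_hourly_py (values : List Int) : List Int :=
  let days_per_month : List Int := [31, 28, 31, 30, 31, 30, 31, 31, 30, 31, 30, 31]
  let r := days_per_month.foldl (fun (st : List Int × Int) days =>
      let steps := days * 24
      (st.1 ++ [(PySem.List.slice values (some st.2) (some (st.2 + steps))).sum],
       st.2 + steps))
    ([], 0)
  r.1

-- ===== PORT B =====
def month_sums_from_hourly_py_alt (values : List Int) : List Int :=
  let n : Int := values.length
  -- pfx-sum table built by one loop (pfx[k] is always indexed in range; getD 0 never fires)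
  let pfx := (values.foldl (fun (st : Int × List Int) v =>
      (st.1 + v, st.2 ++ [st.1 + v])) (0, [0])).2
  let bounds : List Int := [0, 744, 1416, 2160, 2880, 3624, 4344, 5088, 5832, 6552, 7296, 8016, 8760]
  (List.range 12).map (fun i =>
    (PySem.List.pyGet? pfx (min (bounds.getD (i + 1) 0) n)).getD 0
      - (PySem.List.pyGet? pfx (min (bounds.getD i 0) n)).getD 0)

-- ===== PRECONDITION & SPEC =====
def Spec_month_sums_from_hourly_py (values : List Int) (out : List Int) : Prop := out = month_sums_from_hourly_py_alt values
instance (values : List Int) (out : List Int) : Decidable (Spec_month_sums_from_hourly_py values out) := by unfold Spec_month_sums_from_hourly_py; infer_instance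

-- ===== CLAIM (what is proved, stated in full; the proofs are below) =====
def Claim_equal_month_sums_from_hourly_py : Prop := ∀ (values : List Int), Dom_month_sums_from_hourly_py values → Spec_month_sums_from_hourly_py values (month_sums_from_hourly_py values)

-- ===== LEMMAS AND PROOFS =====

lemma foldP (xs : List Int) : ∀ (acc : Int) (pre : List Int),
    xs.foldl (fun (st : Int × List Int) v => (st.1 + v, st.2 ++ [st.1 + v])) (acc, pre)
      = (acc + xs.sum, pre ++ (List.range xs.length).map (fun k => acc + (xs.take (k + 1)).sum)) := by
  induction xs with
  | nil => intro acc pre; simp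
  | cons x xs ih =>
    intro acc pre
    rw [List.foldl_cons, ih]
    apply Prod.ext <;>
      simp [List.range_succ_eq_map, List.map_map, Function.comp, List.take_succ_cons, add_assoc]

lemma getP (xs : List Int) (m : ℕ) (hm : m ≤ xs.length) :
    PySem.List.pyGet?
      ((xs.foldl (fun (st : Int × List Int) v => (st.1 + v, st.2 ++ [st.1 + v])) (0, [0])).2)
      (m : Int) = some ((xs.take m).sum) := by
  rw [foldP]
  rw [PySem.List.pyGet?_natCast]
  cases m with
  | zero => simp
  | succ j =>
    have hj : j < xs.length := by omega
    simp [hj]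

lemma sum_drop_take (xs : List Int) (a b : ℕ) (hab : a ≤ b) :
    ((xs.drop a).take (b - a)).sum = (xs.take b).sum - (xs.take a).sum := by
  have h : xs.take b = xs.take a ++ (xs.drop a).take (b - a) := by
    conv_lhs => rw [show b = a + (b - a) by omega]
    exact List.take_add
  rw [h, List.sum_append]; ring

lemma take_min_length (xs : List Int) (b : ℕ) : xs.take (min b xs.length) = xs.take b := by
  rcases le_total b xs.length with h | h
  · rw [Nat.min_eq_left h]
  · rw [Nat.min_eq_right h, List.take_length, List.take_of_length_le h]

lemma entryB (xs : List Int) (b : Int) (b' : ℕ) (hb : b = (b' : Int)) :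
    (PySem.List.pyGet?
        ((xs.foldl (fun (st : Int × List Int) v => (st.1 + v, st.2 ++ [st.1 + v])) (0, [0])).2)
        (min b (xs.length : Int))).getD 0 = (xs.take b').sum := by
  subst hb
  rw [show min ((b' : ℕ) : Int) ((xs.length : ℕ) : Int) = ((min b' xs.length : ℕ) : Int) by
        simp [Nat.cast_min]]
  rw [getP xs (min b' xs.length) (min_le_right _ _), Option.getD_some, take_min_length]

lemma entryA (xs : List Int) (a b : Int) (a' b' : ℕ) (ha : a = (a' : Int)) (hb : b = (b' : Int))
    (hab : a' ≤ b') :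
    (PySem.List.slice xs (some a) (some b)).sum = (xs.take b').sum - (xs.take a').sum := by
  subst ha hb
  rw [PySem.List.slice_natCast]
  exact sum_drop_take xs a' b' hab

lemma entryA0 (xs : List Int) (b : Int) (b' : ℕ) (hb : b = (b' : Int)) :
    (PySem.List.slice xs none (some b)).sum = (xs.take b').sum := by
  subst hb
  rw [PySem.List.slice_to_natCast]

lemma entryB0 (xs : List Int) :
    (PySem.List.pyGet?
        ((xs.foldl (fun (st : Int × List Int) v => (st.1 + v, st.2 ++ [st.1 + v])) (0, [0])).2)
        0).getD 0 = 0 := by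
  have h := getP xs 0 (Nat.zero_le _)
  simp only [Nat.cast_zero] at h
  rw [h]
  simp

lemma month_entry (xs : List Int) (a b : Int) (a' b' : ℕ) (ha : a = (a' : Int))
    (hb : b = (b' : Int)) (hab : a' ≤ b') :
    (PySem.List.slice xs (some a) (some b)).sum
      = (PySem.List.pyGet?
            ((xs.foldl (fun (st : Int × List Int) v => (st.1 + v, st.2 ++ [st.1 + v])) (0, [0])).2)
            (min b (xs.length : Int))).getD 0
        - (PySem.List.pyGet?
            ((xs.foldl (fun (st : Int × List Int) v => (st.1 + v, st.2 ++ [st.1 + v])) (0, [0])).2)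
            (min a (xs.length : Int))).getD 0 := by
  rw [entryA xs a b a' b' ha hb hab, entryB xs b b' hb, entryB xs a a' ha]

-- ===== VERDICT (by name: the statement is the Claim_ definition above) =====
theorem month_sums_from_hourly_py_spec : Claim_equal_month_sums_from_hourly_py := by
  intro values _
  unfold Spec_month_sums_from_hourly_py month_sums_from_hourly_py month_sums_from_hourly_py_alt
  have hr : List.range 12 = [0,1,2,3,4,5,6,7,8,9,10,11] := by rfl
  simp only [List.foldl_cons, List.foldl_nil, hr, List.map_cons, List.map_nil, List.getD]
  norm_num
  refine ⟨?_, ?_, ?_, ?_, ?_, ?_, ?_, ?_, ?_, ?_, ?_, ?_⟩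
  · rw [entryA0 values 744 744 (by norm_num), entryB values 744 744 (by norm_num), entryB0 values]
    simp
  · exact month_entry values 744 1416 744 1416 (by norm_num) (by norm_num) (by norm_num)
  · exact month_entry values 1416 2160 1416 2160 (by norm_num) (by norm_num) (by norm_num)
  · exact month_entry values 2160 2880 2160 2880 (by norm_num) (by norm_num) (by norm_num)
  · exact month_entry values 2880 3624 2880 3624 (by norm_num) (by norm_num) (by norm_num)
  · exact month_entry values 3624 4344 3624 4344 (by norm_num) (by norm_num) (by norm_num)
  · exact month_entry values 4344 5088 4344 5088 (by norm_num) (by norm_num) (by norm_num)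
  · exact month_entry values 5088 5832 5088 5832 (by norm_num) (by norm_num) (by norm_num)
  · exact month_entry values 5832 6552 5832 6552 (by norm_num) (by norm_num) (by norm_num)
  · exact month_entry values 6552 7296 6552 7296 (by norm_num) (by norm_num) (by norm_num)
  · exact month_entry values 7296 8016 7296 8016 (by norm_num) (by norm_num) (by norm_num)
  · exact month_entry values 8016 8760 8016 8760 (by norm_num) (by norm_num) (by norm_num)
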